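-- pv_equiv track=rewrite | github.com/abeaufays/AdventOfCode | 2024/9/part2.py | get_last_filled_finder
-- ===== SOURCE A (Python) =====
-- from collections.abc import Generator
--
-- EMPTY = -1
--
-- def get_last_filled_finder(
--     file_map: list[int],
-- ) -> Generator[tuple[int, int], None, None]:
--     file_map_buffer = file_map.copy()
--     current_id = None
--     for idx, file_slot in enumerate(file_map_buffer[::-1]):
--         if file_slot != EMPTY:
--             if current_id is None:
--                 current_id, upper_bound = file_slot, len(file_map_buffer) - idx - 1
--         if current_id is not None and current_id != file_slot:
--             yield (len(file_map_buffer) - idx, upper_bound)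
--             if file_slot == EMPTY:
--                 upper_bound = None
--                 current_id = None
--             else:
--                 current_id = file_slot
--                 upper_bound = len(file_map_buffer) - idx - 1
-- ===== SOURCE B (Python) =====
-- EMPTY = -1
--
-- def get_last_filled_finder(file_map):
--     i = len(file_map)
--     while i > 0:
--         hi = i - 1
--         v = file_map[hi]
--         lo = hi
--         while lo > 0 and file_map[lo - 1] == v:
--             lo -= 1
--         if v != EMPTY and lo != 0:
--             yield (lo, hi)
--         i = lo
-- ===== Notes on version B (the rewrite author's own statement) =====
-- stated objective: simpler
-- what changed: A's reversed-enumerate scan with a current_id/upper_bound state machine and transition-triggered yields is replaced by a plain index loop that strips one whole trailing run at a time and yields it directly (skipping EMPTY runs and the run that reaches index 0).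
import Mathlib
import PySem

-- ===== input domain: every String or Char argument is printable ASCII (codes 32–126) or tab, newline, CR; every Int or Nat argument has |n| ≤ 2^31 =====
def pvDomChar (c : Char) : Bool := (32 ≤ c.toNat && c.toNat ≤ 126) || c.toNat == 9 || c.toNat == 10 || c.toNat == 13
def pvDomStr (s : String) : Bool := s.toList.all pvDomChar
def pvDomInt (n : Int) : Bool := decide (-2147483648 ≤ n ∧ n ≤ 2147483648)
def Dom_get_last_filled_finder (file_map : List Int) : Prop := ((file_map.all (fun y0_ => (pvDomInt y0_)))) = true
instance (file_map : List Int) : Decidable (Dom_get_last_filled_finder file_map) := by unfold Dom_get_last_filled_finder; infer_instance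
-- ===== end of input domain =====

-- B replaces A's reverse element-by-element state machine by a loop that strips one whole
-- trailing run at a time (objective: simpler). A is a generator; equivalence is about the
-- list of yielded pairs.

-- ===== PORT A =====
-- EMPTY = -1
def pvEMPTY : Int := -1

-- loop body of A's for-loop over enumerate(file_map_buffer[::-1]); state = (yielded, current_id/upper_bound)
def aStep (n : Int) (st : List (Int × Int) × Option (Int × Int)) (p : Int × Int) :
    List (Int × Int) × Option (Int × Int) :=
  let idx := p.1
  let slot := p.2
  let cur :=
    if slot ≠ pvEMPTY then
      match st.2 with
      | none => some (slot, n - idx - 1)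
      | some c => some c
    else st.2
  match cur with
  | some c =>
    if c.1 ≠ slot then
      let out := st.1 ++ [(n - idx, c.2)]
      if slot = pvEMPTY then (out, none) else (out, some (slot, n - idx - 1))
    else (st.1, cur)
  | none => (st.1, cur)

def get_last_filled_finder (file_map : List Int) : List (Int × Int) :=
  let file_map_buffer := file_map
  let rev := (PySem.List.slice? file_map_buffer none none (-1)).getD []
  ((PySem.List.enumerate rev 0).foldl (aStep (file_map_buffer.length : Int)) ([], none)).1

-- ===== PORT B =====
-- inner while: lo starts at its argument, decremented while lo > 0 and file_map[lo-1] == v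
def bShrink (fm : List Int) (v : Int) : Nat → Nat
  | 0 => 0
  | lo + 1 => if PySem.List.pyGetD fm (lo : Int) 0 = v then bShrink fm v lo else lo + 1

theorem bShrink_le (fm : List Int) (v : Int) : ∀ lo, bShrink fm v lo ≤ lo := by
  intro lo
  induction lo with
  | zero => simp [bShrink]
  | succ k ih => simp only [bShrink]; split <;> omega

-- outer while on i (length of the still-unprocessed prefix)
def bLoop (fm : List Int) : Nat → List (Int × Int)
  | 0 => []
  | i + 1 =>
    let v := PySem.List.pyGetD fm (i : Int) 0
    let lo := bShrink fm v i
    (if v ≠ pvEMPTY ∧ lo ≠ 0 then [((lo : Int), (i : Int))] else []) ++ bLoop fm lo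
  decreasing_by exact Nat.lt_succ_of_le (bShrink_le fm v i)

def get_last_filled_finder_alt (file_map : List Int) : List (Int × Int) :=
  bLoop file_map file_map.length

-- ===== PRECONDITION & SPEC =====
def Spec_get_last_filled_finder (file_map : List Int) (out : List (Int × Int)) : Prop := out = get_last_filled_finder_alt file_map
instance (file_map : List Int) (out : List (Int × Int)) : Decidable (Spec_get_last_filled_finder file_map out) := by unfold Spec_get_last_filled_finder; infer_instance

-- ===== CLAIM (what is proved, stated in full; the proofs are below) =====
def Claim_equal_get_last_filled_finder : Prop := ∀ (file_map : List Int), Dom_get_last_filled_finder file_map → Spec_get_last_filled_finder file_map (get_last_filled_finder file_map)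

-- ===== LEMMAS AND PROOFS =====

-- A's loop, as a structural recursion producing only the yielded pairs
def aRun (n : Int) : Int → Option (Int × Int) → List Int → List (Int × Int)
  | _, _, [] => []
  | idx, cur, slot :: rest =>
    let cur' :=
      if slot ≠ pvEMPTY then
        match cur with
        | none => some (slot, n - idx - 1)
        | some c => some c
      else cur
    match cur' with
    | some c =>
      if c.1 ≠ slot then
        (n - idx, c.2) ::
          (if slot = pvEMPTY then aRun n (idx + 1) none rest
           else aRun n (idx + 1) (some (slot, n - idx - 1)) rest)
      else aRun n (idx + 1) cur' rest
    | none => aRun n (idx + 1) cur' rest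

theorem foldl_aStep (n : Int) :
    ∀ (ys : List Int) (idx : Int) (out : List (Int × Int)) (cur : Option (Int × Int)),
      ((PySem.List.enumerate ys idx).foldl (aStep n) (out, cur)).1 = out ++ aRun n idx cur ys := by
  intro ys
  induction ys with
  | nil => intro idx out cur; simp [PySem.List.enumerate_nil, aRun]
  | cons slot rest ih =>
    intro idx out cur
    rw [PySem.List.enumerate_cons]
    simp only [List.foldl_cons]
    by_cases hs : slot = pvEMPTY
    · subst hs
      cases cur with
      | none => simp [aStep, aRun, ih]
      | some c =>
        by_cases hc : c.1 = pvEMPTY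
        · simp [aStep, aRun, hc, ih]
        · simp [aStep, aRun, hc, ih, List.append_assoc]
    · cases cur with
      | none => simp [aStep, aRun, hs, ih]
      | some c =>
        by_cases hc : c.1 = slot
        · simp [aStep, aRun, hs, hc, ih]
        · simp [aStep, aRun, hs, hc, ih, List.append_assoc]

theorem pyGetD_lt (fm : List Int) (j : Nat) (hj : j < fm.length) :
    PySem.List.pyGetD fm (j : Int) 0 = fm[j] := by
  rw [PySem.List.pyGetD_natCast]
  exact List.getD_eq_getElem fm 0 hj

-- strip a trailing EMPTY run: bLoop does not yield there
theorem bLoop_shrink_empty (fm : List Int) : ∀ j, bLoop fm (bShrink fm pvEMPTY j) = bLoop fm j := by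
  intro j
  induction j using Nat.strong_induction_on with
  | _ j ih =>
    match j with
    | 0 => simp [bShrink]
    | k + 1 =>
      rw [bShrink]
      split
      · rename_i h
        rw [ih k (by omega)]
        conv_rhs => rw [bLoop]
        simp only [h]
        rw [if_neg (by simp), List.nil_append]
        exact (ih k (by omega)).symm
      · rfl

theorem bLoop_succ_empty (fm : List Int) (j : Nat) (h : PySem.List.pyGetD fm (j : Int) 0 = pvEMPTY) :
    bLoop fm (j + 1) = bLoop fm j := by
  rw [bLoop]
  simp only [h, pvEMPTY]
  simpa [← h, pvEMPTY] using bLoop_shrink_empty fm j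

-- the joint invariant: A's remaining loop (over the reversed prefix of length i) produces
-- exactly what B's outer loop produces from i, given the matching open-run state
theorem main_inv (fm : List Int) :
    ∀ i, i ≤ fm.length →
      (aRun (fm.length : Int) ((fm.length : Int) - i) none ((fm.take i).reverse) = bLoop fm i
       ∧ ∀ v ub, v ≠ pvEMPTY →
          aRun (fm.length : Int) ((fm.length : Int) - i) (some (v, ub)) ((fm.take i).reverse) =
            (if bShrink fm v i ≠ 0 then [((bShrink fm v i : Int), ub)] else []) ++ bLoop fm (bShrink fm v i)) := by
  intro i
  induction i with
  | zero =>
    intro _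
    constructor
    · simp [aRun, bLoop]
    · intro v ub _; simp [aRun, bShrink, bLoop]
  | succ j ih =>
    intro hij
    have hj : j < fm.length := by omega
    obtain ⟨ihn, ihs⟩ := ih (by omega)
    have htake : (fm.take (j + 1)).reverse = fm[j] :: (fm.take j).reverse := by
      rw [List.take_add_one]
      simp [List.getElem?_eq_getElem hj]
    have hidx : (fm.length : Int) - ((j + 1 : Nat) : Int) + 1 = (fm.length : Int) - (j : Int) := by push_cast; ring
    have hyield : (fm.length : Int) - ((fm.length : Int) - ((j + 1 : Nat) : Int)) = ((j + 1 : Nat) : Int) := by push_cast; ring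
    have hub : (fm.length : Int) - ((fm.length : Int) - ((j + 1 : Nat) : Int)) - 1 = (j : Int) := by push_cast; ring
    have hget : PySem.List.pyGetD fm (j : Int) 0 = fm[j] := pyGetD_lt fm j hj
    constructor
    · -- current_id is None
      rw [htake, aRun]
      by_cases hs : fm[j] = pvEMPTY
      · rw [bLoop_succ_empty fm j (by rw [hget, hs])]
        simp only [hs, hidx]
        simpa using ihn
      · simp only [if_pos hs, hidx, hub]
        simp only [ne_eq, hs, not_false_iff, if_true]
        rw [if_neg (by simp)]
        rw [ihs fm[j] (j : Int) hs]
        conv_rhs => rw [bLoop]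
        simp [hget, hs]
    · -- current_id = some (v, ub)
      intro v ub hv
      rw [htake, aRun]
      by_cases hsv : fm[j] = v
      · -- same value: run merges
        have : bShrink fm v (j + 1) = bShrink fm v j := by
          rw [bShrink, if_pos (by rw [hget, hsv])]
        simp only [hsv, hidx, this, if_pos hv]
        simpa using ihs v ub hv
      · have hshr : bShrink fm v (j + 1) = j + 1 := by
          rw [bShrink, if_neg (by rw [hget]; exact fun h => hsv h)]
        have hvs : v ≠ fm[j] := fun h => hsv h.symm
        by_cases hs : fm[j] = pvEMPTY
        · -- transition at an EMPTY slot: yield, reset state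
          simp only [hs, if_neg (by simp : ¬(pvEMPTY ≠ pvEMPTY)), if_pos hv, hidx,
            hyield, ihn, hshr]
          rw [if_pos (by omega : j + 1 ≠ 0), bLoop_succ_empty fm j (by rw [hget, hs])]
          simp
        · -- transition at another file id: yield, open the new run
          have hub2 : ((j + 1 : Nat) : Int) - 1 = (j : Int) := by push_cast; ring
          simp only [if_pos hs, if_pos (by simpa [ne_eq] using hvs), if_neg hs, hidx, hyield,
            hub2]
          rw [ihs fm[j] (j : Int) hs, hshr]
          rw [if_pos (by omega : (j + 1 : Nat) ≠ 0)]
          conv_rhs => rw [bLoop]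
          simp [hget, hs]

-- ===== VERDICT (by name: the statement is the Claim_ definition above) =====
theorem get_last_filled_finder_spec : Claim_equal_get_last_filled_finder := by
  intro fm _
  show get_last_filled_finder fm = get_last_filled_finder_alt fm
  simp only [get_last_filled_finder, get_last_filled_finder_alt]
  rw [PySem.List.slice?_none_none_neg_one]
  simp only [Option.getD_some]
  rw [foldl_aStep (fm.length : Int) fm.reverse 0 [] none]
  have h := (main_inv fm fm.length le_rfl).1
  simpa using h
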